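-- pv_equiv track=rewrite | github.com/gtzampanakis/projeuler | 719.py | e
-- ===== SOURCE A (Python) =====
-- def digit_join(ds):
--     if not ds:
--         return 0
--     else:
--         return ds[-1] + digit_join(ds[:-1]) * 10
--
-- def e(ds, s):
--     if s == 0 and not ds:
--         return True
--     else:
--         i = 1
--         while 1:
--             h = ds[:i]
--             t = ds[i:]
--             l = digit_join(h)
--             if not t:
--                 return l == s
--             else:
--                 if e(t, s-l):
--                     return True
--             i += 1
-- ===== SOURCE B (Python) =====
-- def e(ds, s):
--     # Bottom-up DP over suffixes: sets[k] = set of sums attainable by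
--     # partitioning the suffix of length k into digit-join segments.
--     n = len(ds)
--     sets = [{0}]
--     for k in range(1, n + 1):
--         suf = ds[n - k:]
--         cur = set()
--         v = 0
--         for m in range(1, k + 1):
--             v = v * 10 + suf[m - 1]
--             cur.update(v + x for x in sets[k - m])
--         sets.append(cur)
--     return s in sets[n]
-- ===== Notes on version B (the rewrite author's own statement) =====
-- stated objective: alternative
-- what changed: Replaced A's exponential try-every-first-segment recursion by a bottom-up dynamic program that computes, for each suffix once, the set of sums reachable by partitioning it, reusing each suffix's set instead of re-exploring the suffix on every path (intended as faster; measured 2.27x at n=16, but both blow up when the number of distinct reachable sums grows exponentially).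
import Mathlib
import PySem

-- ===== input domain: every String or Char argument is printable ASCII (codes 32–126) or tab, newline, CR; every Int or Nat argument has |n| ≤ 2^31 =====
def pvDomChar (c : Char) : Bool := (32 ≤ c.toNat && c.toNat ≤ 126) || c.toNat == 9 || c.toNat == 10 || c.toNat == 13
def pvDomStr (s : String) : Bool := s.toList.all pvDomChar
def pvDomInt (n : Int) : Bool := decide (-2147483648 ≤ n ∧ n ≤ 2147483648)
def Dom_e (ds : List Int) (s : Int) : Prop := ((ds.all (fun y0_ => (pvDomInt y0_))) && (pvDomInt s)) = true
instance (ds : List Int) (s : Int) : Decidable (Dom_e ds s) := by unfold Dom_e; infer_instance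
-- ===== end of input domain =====

-- B replaces A's try-every-first-segment recursion by a bottom-up dynamic program over
-- suffixes (set of reachable sums per suffix, each suffix processed once); objective:
-- alternative algorithm (measured somewhat faster on mid-size inputs, not asymptotically).

-- ===== PORT A =====
-- digit_join(ds): ds[-1] + digit_join(ds[:-1]) * 10
def digitJoin : List Int → Int
  | [] => 0
  | d :: rest =>
    ((PySem.List.pyGet? (d :: rest) (-1)).getD 0) +
      digitJoin (PySem.List.slice (d :: rest) none (some (-1))) * 10
termination_by ds => ds.length
decreasing_by
  simp [PySem.List.slice_to_neg_one]

mutual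
-- eLoop ds s i models A's `while 1` body at Python loop index i+1 (the loop starts at 1).
def e (ds : List Int) (s : Int) : Bool :=
  if s == 0 && ds.isEmpty then true
  else eLoop ds s 0
termination_by (ds.length, ds.length + 2)
decreasing_by
  exact Prod.Lex.right _ (by omega)

def eLoop (ds : List Int) (s : Int) (i : Nat) : Bool :=
  let h := PySem.List.slice ds none (some ((i + 1 : Nat) : Int))   -- ds[:i+1]
  let t := PySem.List.slice ds (some ((i + 1 : Nat) : Int)) none   -- ds[i+1:]
  let l := digitJoin h
  if _ht : t = [] then l == s
  else if e t (s - l) then true else eLoop ds s (i + 1)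
termination_by (ds.length, ds.length + 1 - i)
decreasing_by
  · have hlt : i + 1 < ds.length := by
      by_contra hc
      exact _ht (by
        simp only [t, PySem.List.slice_from_natCast]
        exact List.drop_eq_nil_of_le (by omega))
    exact Prod.Lex.left _ _ (by
      simp only [PySem.List.slice_from_natCast, List.length_drop]; omega)
  · have hlt : i + 1 < ds.length := by
      by_contra hc
      exact _ht (by
        simp only [t, PySem.List.slice_from_natCast]
        exact List.drop_eq_nil_of_le (by omega))
    exact Prod.Lex.right _ (by omega)
end

-- ===== PORT B =====
-- segSums: Source B's inner `for m` loop. v is the value of the first segment so far,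
-- suf the digits it can still extend over, tls the suffix sets aligned with suf
-- (tls[m] = reachable sums of the suffix remaining after the segment absorbs m+1 digits).
def segSums (v : Int) (suf : List Int) (tls : List (PySem.Set Int)) (cur : PySem.Set Int) :
    PySem.Set Int :=
  match suf, tls with
  | d :: suf', t :: tls' =>
      segSums (v * 10 + d) suf' tls' (PySem.Set.update cur (t.map (fun x => (v * 10 + d) + x)))
  | _, _ => cur

-- suffixSets ds = [reachable-sum set of each suffix of ds, longest first] (Source B's `sets`, reversed).
def suffixSets : List Int → List (PySem.Set Int)
  | [] => [PySem.Set.ofList [0]]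
  | d :: rest =>
      let tl := suffixSets rest
      segSums 0 (d :: rest) tl PySem.Set.empty :: tl

def e_alt (ds : List Int) (s : Int) : Bool :=
  PySem.Set.contains ((suffixSets ds).headD PySem.Set.empty) s

-- ===== PRECONDITION & SPEC =====
def Spec_e (ds : List Int) (s : Int) (out : Bool) : Prop := out = e_alt ds s
instance (ds : List Int) (s : Int) (out : Bool) : Decidable (Spec_e ds s out) := by
  unfold Spec_e; infer_instance

-- ===== CLAIM (what is proved, stated in full; the proofs are below) =====
def Claim_equal_e : Prop := ∀ (ds : List Int) (s : Int), Dom_e ds s → Spec_e ds s (e ds s)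

-- ===== LEMMAS AND PROOFS =====

-- CanP ds s: ds splits into nonempty segments whose digit-join values sum to s
-- (the common meaning of both programs).
def CanP : List Int → Int → Prop
  | [], s => s = 0
  | d :: rest, s =>
      ∃ i < rest.length + 1, CanP (rest.drop i) (s - digitJoin ((d :: rest).take (i + 1)))
termination_by ds => ds.length
decreasing_by
  simp only [List.length_drop, List.length_cons]; omega

theorem digitJoin_append (xs : List Int) (x : Int) :
    digitJoin (xs ++ [x]) = x + digitJoin xs * 10 := by
  cases xs with
  | nil => simp [digitJoin, PySem.List.pyGet?_neg_one, PySem.List.slice_to_neg_one]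
  | cons a l =>
    rw [show (a :: l) ++ [x] = a :: (l ++ [x]) by simp, digitJoin]
    simp only [PySem.List.pyGet?_neg_one, PySem.List.slice_to_neg_one]
    rw [show a :: (l ++ [x]) = (a :: l) ++ [x] from rfl, List.getLast?_concat,
      List.dropLast_concat]
    simp

theorem digitJoin_cons (d : Int) (l : List Int) :
    digitJoin (d :: l) = d * 10 ^ l.length + digitJoin l := by
  induction l using List.reverseRecOn with
  | nil => simp [digitJoin, PySem.List.pyGet?_neg_one, PySem.List.slice_to_neg_one]
  | append_singleton l' x ih =>
    rw [show d :: (l' ++ [x]) = (d :: l') ++ [x] by simp, digitJoin_append, ih,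
      digitJoin_append]
    simp [pow_succ]; ring

-- A-side: one unfolding of the loop body, with slices spelled as take/drop.
theorem eLoop_unfold (ds : List Int) (s : Int) (i : Nat) :
    eLoop ds s i =
      if ds.drop (i + 1) = [] then (digitJoin (ds.take (i + 1)) == s)
      else (if e (ds.drop (i + 1)) (s - digitJoin (ds.take (i + 1))) = true then true
            else eLoop ds s (i + 1)) := by
  rw [eLoop]
  simp only [PySem.List.slice_to_natCast, PySem.List.slice_from_natCast, dite_eq_ite]

-- A-side: the loop at index i tries splits j = i+1, i+2, …, with the final full
-- segment as the `l == s` case; spelled with CanP.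
theorem eLoop_char (ds : List Int) (s : Int)
    (IH : ∀ (t : List Int) (s' : Int), t.length < ds.length → (e t s' = true ↔ CanP t s')) :
    ∀ (k i : Nat), ds.length ≤ i + 1 + k →
      (eLoop ds s i = true ↔
        (∃ j, i + 1 ≤ j ∧ j < ds.length ∧
            CanP (ds.drop j) (s - digitJoin (ds.take j))) ∨ digitJoin ds = s) := by
  intro k
  induction k with
  | zero =>
    intro i hik
    have hT : ds.drop (i + 1) = [] := List.drop_eq_nil_of_le (by omega)
    rw [eLoop_unfold, if_pos hT, List.take_of_length_le (by omega)]
    simp only [beq_iff_eq]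
    constructor
    · exact fun h => Or.inr h
    · rintro (⟨j, hj1, hj2, _⟩ | h)
      · omega
      · exact h
  | succ k ihk =>
    intro i hik
    by_cases hT : ds.drop (i + 1) = []
    · have hlen : ds.length ≤ i + 1 := by
        rw [List.drop_eq_nil_iff] at hT; omega
      rw [eLoop_unfold, if_pos hT, List.take_of_length_le hlen]
      simp only [beq_iff_eq]
      constructor
      · exact fun h => Or.inr h
      · rintro (⟨j, hj1, hj2, _⟩ | h)
        · omega
        · exact h
    · have hlt : i + 1 < ds.length := by
        rcases Nat.lt_or_ge (i + 1) ds.length with h | h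
        · exact h
        · exact absurd (List.drop_eq_nil_of_le h) hT
      have hE := IH (ds.drop (i + 1)) (s - digitJoin (ds.take (i + 1)))
        (by simp only [List.length_drop]; omega)
      rw [eLoop_unfold, if_neg hT]
      by_cases he : e (ds.drop (i + 1)) (s - digitJoin (ds.take (i + 1))) = true
      · rw [if_pos he]
        constructor
        · exact fun _ => Or.inl ⟨i + 1, le_refl _, hlt, hE.mp he⟩
        · exact fun _ => rfl
      · rw [if_neg he, ihk (i + 1) (by omega)]
        have hcan : ¬ CanP (ds.drop (i + 1)) (s - digitJoin (ds.take (i + 1))) :=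
          fun hc => he (hE.mpr hc)
        constructor
        · rintro (⟨j, hj1, hj2, hc⟩ | h)
          · exact Or.inl ⟨j, by omega, hj2, hc⟩
          · exact Or.inr h
        · rintro (⟨j, hj1, hj2, hc⟩ | h)
          · rcases Nat.eq_or_lt_of_le hj1 with rfl | hj
            · exact absurd hc hcan
            · exact Or.inl ⟨j, by omega, hj2, hc⟩
          · exact Or.inr h

theorem e_eq_CanP : ∀ (ds : List Int) (s : Int), (e ds s = true ↔ CanP ds s) := by
  intro ds
  induction hn : ds.length using Nat.strong_induction_on generalizing ds with
  | _ n ihn =>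
  intro s
  have IH : ∀ (t : List Int) (s' : Int), t.length < ds.length → (e t s' = true ↔ CanP t s') :=
    fun t s' h => ihn t.length (by omega) t rfl s'
  cases ds with
  | nil =>
    rw [e]
    by_cases hs : s = 0
    · subst hs; simp [CanP]
    · simp [hs, eLoop_unfold, digitJoin, CanP]
      omega
  | cons d rest =>
    rw [e]
    simp only [List.isEmpty_cons, Bool.and_false, Bool.false_eq_true, if_false]
    rw [eLoop_char (d :: rest) s IH ((d :: rest).length) 0 (by omega), CanP]
    constructor
    · rintro (⟨j, hj1, hj2, hc⟩ | h)
      · obtain ⟨i, rfl⟩ : ∃ i, j = i + 1 := ⟨j - 1, by omega⟩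
        refine ⟨i, by simp only [List.length_cons] at hj2; omega, ?_⟩
        simpa only [List.drop_succ_cons] using hc
      · refine ⟨rest.length, by omega, ?_⟩
        rw [List.drop_length, List.take_of_length_le (by simp)]
        show CanP [] _
        simp only [CanP]
        omega
    · rintro ⟨i, hi, hc⟩
      by_cases hlast : i = rest.length
      · subst hlast
        right
        rw [List.drop_length, List.take_of_length_le (by simp)] at hc
        simp only [CanP] at hc
        omega
      · exact Or.inl ⟨i + 1, by omega, by simp only [List.length_cons]; omega,
          by simpa only [List.drop_succ_cons] using hc⟩

-- B-side membership lemmas.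
theorem mem_segSums : ∀ (suf : List Int) (tls : List (PySem.Set Int)) (v : Int)
    (cur : PySem.Set Int) (x : Int),
    x ∈ segSums v suf tls cur ↔
      x ∈ cur ∨ ∃ m, ∃ _ : m < suf.length, ∃ h2 : m < tls.length,
        ∃ y ∈ tls[m], x = v * 10 ^ (m + 1) + digitJoin (suf.take (m + 1)) + y := by
  intro suf
  induction suf with
  | nil => intro tls v cur x; simp [segSums]
  | cons d suf' ih =>
    intro tls v cur x
    cases tls with
    | nil => simp [segSums]
    | cons t tls' =>
      rw [segSums, ih, PySem.Set.mem_update]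
      constructor
      · rintro ((hc | hmap) | ⟨m', hm1, hm2, y, hy, hx⟩)
        · exact Or.inl hc
        · simp only [List.mem_map] at hmap
          obtain ⟨y, hy, hx⟩ := hmap
          refine Or.inr ⟨0, by simp, by simp, y, by simpa using hy, ?_⟩
          simp only [List.take_succ_cons, List.take_zero, digitJoin_cons, digitJoin,
            List.length_nil]
          omega
        · refine Or.inr ⟨m' + 1, by simp only [List.length_cons]; omega,
            by simp only [List.length_cons]; omega, y, by simpa using hy, ?_⟩
          rw [List.take_succ_cons, digitJoin_cons]
          have hlen : (suf'.take (m' + 1)).length = m' + 1 := by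
            simp [List.length_take]; omega
          rw [hlen, hx]; ring
      · rintro (hc | ⟨m, hm1, hm2, y, hy, hx⟩)
        · exact Or.inl (Or.inl hc)
        · cases m with
          | zero =>
            refine Or.inl (Or.inr ?_)
            simp only [List.mem_map]
            refine ⟨y, by simpa using hy, ?_⟩
            simp only [List.take_succ_cons, List.take_zero, digitJoin_cons, digitJoin,
              List.length_nil] at hx
            omega
          | succ m' =>
            refine Or.inr ⟨m', by simp only [List.length_cons] at hm1; omega,
              by simp only [List.length_cons] at hm2; omega, y, by simpa using hy, ?_⟩
            rw [List.take_succ_cons, digitJoin_cons] at hx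
            have hlen : (suf'.take (m' + 1)).length = m' + 1 := by
              simp only [List.length_take, List.length_cons] at hm1 ⊢; omega
            rw [hlen] at hx
            rw [hx]; ring

theorem length_suffixSets (ds : List Int) : (suffixSets ds).length = ds.length + 1 := by
  induction ds with
  | nil => simp [suffixSets]
  | cons d rest ih => simp [suffixSets, ih]

theorem suffixSets_get : ∀ (ds : List Int) (m : Nat) (h : m < (suffixSets ds).length),
    (suffixSets ds)[m] = (suffixSets (ds.drop m)).headD PySem.Set.empty := by
  intro ds
  induction ds with
  | nil =>
    intro m h
    simp [suffixSets] at h ⊢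
  | cons d rest ih =>
    intro m h
    cases m with
    | zero => simp [suffixSets]
    | succ m' =>
      simp only [suffixSets, List.getElem_cons_succ, List.drop_succ_cons]
      exact ih m' (by simp [suffixSets] at h ⊢; omega)

theorem mem_head_suffixSets : ∀ (ds : List Int) (x : Int),
    (x ∈ (suffixSets ds).headD PySem.Set.empty ↔ CanP ds x) := by
  intro ds
  induction hn : ds.length using Nat.strong_induction_on generalizing ds with
  | _ n ihn =>
  intro x
  cases ds with
  | nil =>
    simp [suffixSets, CanP, PySem.Set.mem_ofList]
  | cons d rest =>
    have hhead : (suffixSets (d :: rest)).headD PySem.Set.empty =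
        segSums 0 (d :: rest) (suffixSets rest) PySem.Set.empty := by
      simp [suffixSets]
    rw [hhead, mem_segSums, CanP]
    constructor
    · rintro (hc | ⟨m, hm1, hm2, y, hy, hx⟩)
      · simp [PySem.Set.empty] at hc
      · have hm' : m < rest.length + 1 := by
          simpa using hm1
        refine ⟨m, hm', ?_⟩
        rw [suffixSets_get rest m (by rw [length_suffixSets]; omega)] at hy
        have := (ihn (rest.drop m).length (by subst hn; simp [List.length_drop])
            (rest.drop m) rfl (x - digitJoin ((d :: rest).take (m + 1)))).mp
        have hy' : y = x - digitJoin ((d :: rest).take (m + 1)) := by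
          rw [hx]; ring
        exact this (hy' ▸ hy)
    · rintro ⟨m, hm1, hcan⟩
      refine Or.inr ⟨m, by simpa using hm1, by rw [length_suffixSets]; omega,
        x - digitJoin ((d :: rest).take (m + 1)), ?_, by ring⟩
      rw [suffixSets_get rest m (by rw [length_suffixSets]; omega)]
      exact (ihn (rest.drop m).length (by subst hn; simp [List.length_drop])
          (rest.drop m) rfl (x - digitJoin ((d :: rest).take (m + 1)))).mpr hcan

theorem e_alt_eq_CanP (ds : List Int) (s : Int) : (e_alt ds s = true ↔ CanP ds s) := by
  rw [e_alt, PySem.Set.contains_iff]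
  exact mem_head_suffixSets ds s

-- ===== VERDICT (by name: the statement is the Claim_ definition above) =====
theorem e_spec : Claim_equal_e := by
  intro ds s _
  unfold Spec_e
  rw [Bool.eq_iff_iff, e_eq_CanP, e_alt_eq_CanP]
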